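-- pv_equiv track=rewrite | github.com/robennals/libexpat-rust | meta/scripts/c2rust-cleanup.py | cleanup_type_aliases
-- ===== SOURCE A (Python) =====
-- def cleanup_type_aliases(content: str) -> str:
--     """Replace verbose C FFI type paths with Rust primitives."""
--     replacements = [
--         # Core FFI types -> Rust primitives
--         (r'::core::ffi::c_int', 'i32'),
--         (r'::core::ffi::c_uint', 'u32'),
--         (r'::core::ffi::c_long', 'i64'),  # On 64-bit
--         (r'::core::ffi::c_ulong', 'u64'),  # On 64-bit
--         (r'::core::ffi::c_short', 'i16'),
--         (r'::core::ffi::c_ushort', 'u16'),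
--         (r'::core::ffi::c_char', 'i8'),
--         (r'::core::ffi::c_uchar', 'u8'),
--         (r'::core::ffi::c_float', 'f32'),
--         (r'::core::ffi::c_double', 'f64'),
--         (r'::core::ffi::c_void', 'libc::c_void'),
--     ]
--     for old, new in replacements:
--         content = content.replace(old, new)
--     return content
-- ===== SOURCE B (Python) =====
-- # Single left-to-right scan: at each position try the (non-overlapping) FFI paths once,
-- # instead of 11 full passes over the string.
-- _REPLACEMENTS = [
--     ('::core::ffi::c_int', 'i32'),
--     ('::core::ffi::c_uint', 'u32'),
--     ('::core::ffi::c_long', 'i64'),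
--     ('::core::ffi::c_ulong', 'u64'),
--     ('::core::ffi::c_short', 'i16'),
--     ('::core::ffi::c_ushort', 'u16'),
--     ('::core::ffi::c_char', 'i8'),
--     ('::core::ffi::c_uchar', 'u8'),
--     ('::core::ffi::c_float', 'f32'),
--     ('::core::ffi::c_double', 'f64'),
--     ('::core::ffi::c_void', 'libc::c_void'),
-- ]
--
--
-- def cleanup_type_aliases(content: str) -> str:
--     """Replace verbose C FFI type paths with Rust primitives."""
--     out = []
--     i = 0
--     n = len(content)
--     while i < n:
--         if content[i] == ':':
--             for old, new in _REPLACEMENTS: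
--                 if content.startswith(old, i):
--                     out.append(new)
--                     i += len(old)
--                     break
--             else:
--                 out.append(content[i])
--                 i += 1
--         else:
--             out.append(content[i])
--             i += 1
--     return ''.join(out)
-- ===== Notes on version B (the rewrite author's own statement) =====
-- stated objective: alternative
-- what changed: Instead of 11 sequential whole-string replace passes, B makes one left-to-right scan that at each position matches the first FFI path from a table (the paths are mutually non-overlapping, so one pass yields the same result); it builds the output incrementally and never rescans replaced text.
import Mathlib
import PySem

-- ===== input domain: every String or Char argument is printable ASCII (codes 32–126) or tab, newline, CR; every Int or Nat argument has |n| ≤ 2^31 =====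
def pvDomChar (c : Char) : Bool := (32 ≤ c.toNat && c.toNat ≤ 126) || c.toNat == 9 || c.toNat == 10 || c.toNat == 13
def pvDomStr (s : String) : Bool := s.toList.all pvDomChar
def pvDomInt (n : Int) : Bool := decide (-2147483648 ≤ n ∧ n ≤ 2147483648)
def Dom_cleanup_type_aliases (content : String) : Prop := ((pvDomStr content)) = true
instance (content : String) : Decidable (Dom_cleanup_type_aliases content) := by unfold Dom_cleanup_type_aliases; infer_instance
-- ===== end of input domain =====

-- B replaces A's 11 sequential whole-string replace passes by ONE left-to-right scan with a
-- first-match table lookup at each position (alternative decomposition, same exact output).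

-- ===== PORT A =====
def cleanup_type_aliases (content : String) : String :=
  let replacements : List (String × String) :=
    [ ("::core::ffi::c_int", "i32"),
      ("::core::ffi::c_uint", "u32"),
      ("::core::ffi::c_long", "i64"),
      ("::core::ffi::c_ulong", "u64"),
      ("::core::ffi::c_short", "i16"),
      ("::core::ffi::c_ushort", "u16"),
      ("::core::ffi::c_char", "i8"),
      ("::core::ffi::c_uchar", "u8"),
      ("::core::ffi::c_float", "f32"),
      ("::core::ffi::c_double", "f64"),
      ("::core::ffi::c_void", "libc::c_void") ]
  replacements.foldl (fun content p => PySem.Str.replace content p.1 p.2) content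

-- ===== PORT B =====
-- Source B's table _REPLACEMENTS, on code points
def cuKeys : List (List Char × List Char) :=
  [ ("::core::ffi::c_int".toList, "i32".toList),
    ("::core::ffi::c_uint".toList, "u32".toList),
    ("::core::ffi::c_long".toList, "i64".toList),
    ("::core::ffi::c_ulong".toList, "u64".toList),
    ("::core::ffi::c_short".toList, "i16".toList),
    ("::core::ffi::c_ushort".toList, "u16".toList),
    ("::core::ffi::c_char".toList, "i8".toList),
    ("::core::ffi::c_uchar".toList, "u8".toList),
    ("::core::ffi::c_float".toList, "f32".toList),
    ("::core::ffi::c_double".toList, "f64".toList),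
    ("::core::ffi::c_void".toList, "libc::c_void".toList) ]

-- Source B's inner `for old, new in _REPLACEMENTS: if content.startswith(old, i): … break` / `else:` loop
def cuTry : List (List Char × List Char) → List Char → Option (List Char × List Char)
  | [], _ => none
  | (k, r) :: ps, cs => if k.isPrefixOf cs then some (k, r) else cuTry ps cs

-- Source B's while loop: a single pass, at each position either a table replacement (advance by len(old))
-- or the character itself (advance by 1); the ':' test is Source B's fast-path gate
def cuScan (ps : List (List Char × List Char)) : List Char → List Char
  | [] => []
  | c :: t =>
    if c = ':' then
      match cuTry ps (c :: t) with
      | some (k, r) => r ++ cuScan ps (t.drop (k.length - 1))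
      | none => c :: cuScan ps t
    else c :: cuScan ps t
termination_by cs => cs.length
decreasing_by all_goals simp [List.length_drop]

def cleanup_type_aliases_alt (content : String) : String :=
  String.ofList (cuScan cuKeys content.toList)

-- ===== PRECONDITION & SPEC =====
def Spec_cleanup_type_aliases (content : String) (out : String) : Prop := out = cleanup_type_aliases_alt content
instance (content : String) (out : String) : Decidable (Spec_cleanup_type_aliases content out) := by unfold Spec_cleanup_type_aliases; infer_instance

-- ===== CLAIM (what is proved, stated in full; the proofs are below) =====
def Claim_equal_cleanup_type_aliases : Prop := ∀ (content : String), Dom_cleanup_type_aliases content → Spec_cleanup_type_aliases content (cleanup_type_aliases content)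

-- ===== LEMMAS AND PROOFS =====

-- clean structural form of Python str.replace for a nonempty pattern
def repC (k r : List Char) : List Char → List Char
  | [] => []
  | c :: t =>
    if k.isPrefixOf (c :: t) then r ++ repC k r (t.drop (k.length - 1))
    else c :: repC k r t
termination_by cs => cs.length
decreasing_by all_goals simp [List.length_drop]

theorem repC_nil (k r : List Char) : repC k r [] = [] := by
  rw [repC]

theorem repC_pos (k r : List Char) (c : Char) (t : List Char) (h : k.isPrefixOf (c :: t)) :
    repC k r (c :: t) = r ++ repC k r (t.drop (k.length - 1)) := by
  rw [repC, if_pos h]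

theorem repC_neg (k r : List Char) (c : Char) (t : List Char) (h : ¬ k.isPrefixOf (c :: t)) :
    repC k r (c :: t) = c :: repC k r t := by
  rw [repC, if_neg h]

theorem replace_go_eq (old new : List Char) (hold : old ≠ []) :
    ∀ (fuel : Nat) (l acc : List Char), l.length ≤ fuel →
      PySem.Chars.replace.go old new fuel l acc = acc.reverse ++ repC old new l := by
  intro fuel
  induction fuel with
  | zero =>
    intro l acc hl
    have hl0 : l = [] := List.eq_nil_of_length_eq_zero (Nat.le_zero.mp hl)
    subst hl0
    rw [PySem.Chars.replace.go, repC_nil]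
  | succ f ih =>
    intro l acc hl
    cases l with
    | nil =>
      rw [repC_nil, PySem.Chars.replace.go]
      · simp
      · omega
    | cons c t =>
      have holdpos : 0 < old.length := List.length_pos_iff.mpr hold
      rw [PySem.Chars.replace.go]
      by_cases hp : old.isPrefixOf (c :: t)
      · have hdrop : List.drop old.length (c :: t) = t.drop (old.length - 1) := by
          obtain ⟨o, os, rfl⟩ : ∃ o os, old = o :: os := by
            cases old with
            | nil => simp at hold
            | cons o os => exact ⟨o, os, rfl⟩
          simp
        have hlen : (List.drop old.length (c :: t)).length ≤ f := by
          simp only [List.length_drop, List.length_cons] at *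
          omega
        rw [if_pos hp, ih _ _ hlen, repC_pos _ _ _ _ hp, hdrop]
        simp
      · rw [if_neg hp, ih t (c :: acc) (by simpa using Nat.le_of_succ_le_succ hl),
          repC_neg _ _ _ _ hp]
        simp

theorem replace_eq_repC (s old new : List Char) (hold : old ≠ []) :
    PySem.Chars.replace s old new = repC old new s := by
  rw [PySem.Chars.replace, if_neg (by simp [hold])]
  simpa using replace_go_eq old new hold s.length s [] le_rfl

-- two prefixes of the same list are comparable, applied to an append
theorem prefix_append_cases {v a b : List Char} (h : v <+: a ++ b) : v <+: a ∨ a <+: v :=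
  List.prefix_or_prefix_of_prefix h (List.prefix_append a b)

-- replace passes over a block u in which the pattern can match at no position
theorem repC_append (k r u : List Char)
    (h : ∀ q, q < u.length → ¬ k <+: u.drop q ∧ ¬ u.drop q <+: k) :
    ∀ t, repC k r (u ++ t) = u ++ repC k r t := by
  induction u with
  | nil => simp
  | cons c u' ih =>
    intro t
    have hnp : ¬ k.isPrefixOf ((c :: u') ++ t) := by
      intro hp
      have hpre := List.isPrefixOf_iff_prefix.mp hp
      rcases prefix_append_cases hpre with h1 | h2
      · exact (h 0 (by simp)).1 (by simpa using h1)
      · exact (h 0 (by simp)).2 (by simpa using h2)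
    rw [List.cons_append, repC_neg k r c (u' ++ t) (by simpa using hnp),
      ih (fun q hq => by
        have := h (q + 1) (by simpa using Nat.succ_lt_succ hq)
        simpa using this) t]
    simp

-- cuTry facts
theorem cuTry_eq_some {ps : List (List Char × List Char)} {cs : List Char}
    {p : List Char × List Char} (h : cuTry ps cs = some p) : p ∈ ps ∧ p.1 <+: cs := by
  induction ps with
  | nil => simp [cuTry] at h
  | cons q ps ih =>
    obtain ⟨k, r⟩ := q
    rw [cuTry] at h
    by_cases hp : k.isPrefixOf cs
    · rw [if_pos hp] at h
      cases h
      exact ⟨List.mem_cons_self, List.isPrefixOf_iff_prefix.mp hp⟩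
    · rw [if_neg hp] at h
      obtain ⟨h1, h2⟩ := ih h
      exact ⟨List.mem_cons_of_mem _ h1, h2⟩

theorem cuTry_of_mem {ps : List (List Char × List Char)}
    (hpw : ps.Pairwise (fun a b => ¬ a.1 <+: b.1 ∧ ¬ b.1 <+: a.1))
    {k r : List Char} (hm : (k, r) ∈ ps) {w : List Char} (hp : k <+: w) :
    cuTry ps w = some (k, r) := by
  induction ps with
  | nil => simp at hm
  | cons q ps ih =>
    obtain ⟨k0, r0⟩ := q
    rw [cuTry]
    rcases List.mem_cons.mp hm with heq | hm2
    · cases heq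
      rw [if_pos (List.isPrefixOf_iff_prefix.mpr hp)]
    · have hnp : ¬ k0.isPrefixOf w := by
        intro hpre
        have h0 : k0 <+: w := List.isPrefixOf_iff_prefix.mp hpre
        have hR := (List.pairwise_cons.mp hpw).1 _ hm2
        rcases List.prefix_or_prefix_of_prefix h0 hp with h1 | h2
        · exact hR.1 h1
        · exact hR.2 h2
      rw [if_neg hnp]
      exact ih (List.pairwise_cons.mp hpw).2 hm2

theorem cuTry_none {ps : List (List Char × List Char)} {cs : List Char}
    (h : ∀ p ∈ ps, ¬ p.1 <+: cs) : cuTry ps cs = none := by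
  induction ps with
  | nil => rfl
  | cons q ps ih =>
    obtain ⟨k0, r0⟩ := q
    rw [cuTry, if_neg (fun hp => h _ List.mem_cons_self (List.isPrefixOf_iff_prefix.mp hp))]
    exact ih (fun p hp => h p (List.mem_cons_of_mem _ hp))

theorem cuTry_none' {ps : List (List Char × List Char)} {cs : List Char}
    (h : cuTry ps cs = none) : ∀ p ∈ ps, ¬ p.1 <+: cs := by
  induction ps with
  | nil => simp
  | cons q ps ih =>
    obtain ⟨k0, r0⟩ := q
    rw [cuTry] at h
    by_cases hp : k0.isPrefixOf cs
    · rw [if_pos hp] at h; cases h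
    · rw [if_neg hp] at h
      intro p hmem
      rcases List.mem_cons.mp hmem with heq | hm2
      · cases heq; exact fun hc => hp (List.isPrefixOf_iff_prefix.mpr hc)
      · exact ih h p hm2

theorem cuScan_nilarg (ps : List (List Char × List Char)) : cuScan ps [] = [] := by
  rw [cuScan]

theorem cuScan_nilps : ∀ cs, cuScan [] cs = cs := by
  intro cs
  induction cs with
  | nil => rw [cuScan]
  | cons c t ih =>
    rw [cuScan]
    by_cases hc : c = ':' <;> simp [hc, cuTry, ih]

-- the scan copies any block that contains no ':' verbatim
theorem cuScan_passthrough (ps : List (List Char × List Char)) :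
    ∀ (u X : List Char), (':' : Char) ∉ u → cuScan ps (u ++ X) = u ++ cuScan ps X := by
  intro u
  induction u with
  | nil => simp
  | cons c u' ih =>
    intro X h
    have hc : ¬ c = ':' := fun hq => h (hq ▸ List.mem_cons_self)
    rw [List.cons_append, cuScan, if_neg hc, ih X (fun hq => h (List.mem_cons_of_mem _ hq))]
    simp

theorem drop_eq_singleton_getLast {v : List Char} {x : Char} :
    ∀ s, v.drop s = [x] → v.getLast? = some x := by
  induction v with
  | nil => intro s h; simp at h
  | cons a v' ih =>
    intro s h
    cases s with
    | zero =>
      simp at h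
      obtain ⟨rfl, rfl⟩ := h
      rfl
    | succ s' =>
      rw [List.drop_succ_cons] at h
      cases v' with
      | nil => simp at h
      | cons b v'' => rw [List.getLast?_cons_cons]; exact ih s' h

-- a digit-free pattern w (a suffix of a key v) cannot newly match after a replace whose
-- replacement has a digit in second position and whose first char is not v's last char
theorem noNewMatch (k r : List Char) (r0 r1 : Char) (r' : List Char)
    (hr : r = r0 :: r1 :: r') (hd : r1.isDigit = true)
    (v : List Char) (hv : ∀ c ∈ v, c.isDigit = false) (hlast : v.getLast? ≠ some r0) :
    ∀ (n : Nat) (t : List Char), t.length ≤ n → ∀ (w : List Char) (s : Nat),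
      v.drop s = w → w ≠ [] → ¬ w <+: t → ¬ w <+: repC k r t := by
  intro n
  induction n with
  | zero =>
    intro t ht w s hw hne hnp
    have ht0 : t = [] := List.eq_nil_of_length_eq_zero (Nat.le_zero.mp ht)
    subst ht0
    rw [repC_nil]
    intro hcon
    exact hne (List.prefix_nil.mp hcon)
  | succ n ihn =>
    intro t ht w s hw hne hnp
    cases t with
    | nil =>
      rw [repC_nil]
      intro hcon
      exact hne (List.prefix_nil.mp hcon)
    | cons c t2 =>
      by_cases hp : k.isPrefixOf (c :: t2)
      · rw [repC_pos _ _ _ _ hp, hr]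
        intro hcon
        cases w with
        | nil => exact hne rfl
        | cons w0 w2 =>
          rw [List.cons_append, List.cons_prefix_cons] at hcon
          obtain ⟨hw0, hcon2⟩ := hcon
          cases w2 with
          | nil => exact hlast (hw0 ▸ drop_eq_singleton_getLast s hw)
          | cons w1 w3 =>
            rw [List.cons_append, List.cons_prefix_cons] at hcon2
            obtain ⟨hw1, _⟩ := hcon2
            have hmem : w1 ∈ v := by
              have h1 : w1 ∈ v.drop s := by rw [hw]; simp
              exact List.drop_subset _ _ h1
            have := hv _ hmem
            simp [hw1, hd] at this
      · rw [repC_neg _ _ _ _ hp]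
        intro hcon
        cases w with
        | nil => exact hne rfl
        | cons w0 w2 =>
          rw [List.cons_prefix_cons] at hcon
          obtain ⟨hw0, hcon2⟩ := hcon
          cases hw2e : w2 with
          | nil =>
            subst hw2e
            exact hnp (by rw [hw0]; exact List.cons_prefix_cons.mpr ⟨rfl, List.nil_prefix⟩)
          | cons a b =>
            have hdw2 : v.drop (s + 1) = w2 := by rw [← List.tail_drop, hw]; rfl
            have hne2 : w2 ≠ [] := by rw [hw2e]; exact List.cons_ne_nil a b
            have hnp2 : ¬ w2 <+: t2 := by
              intro h2
              exact hnp (by rw [hw0]; exact List.cons_prefix_cons.mpr ⟨rfl, h2⟩)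
            exact ihn t2 (by simpa using Nat.le_of_succ_le_succ ht) w2 (s + 1) hdw2 hne2 hnp2 hcon2

-- one sequential replace pass fused into the multi-key scan
theorem cuStep (k r : List Char) (ps : List (List Char × List Char))
    (hk : k.head? = some ':')
    (hps : ∀ p ∈ ps, p.1.head? = some ':' ∧ 2 ≤ p.1.length)
    (hpw : ps.Pairwise (fun a b => ¬ a.1 <+: b.1 ∧ ¬ b.1 <+: a.1))
    (hcf : ∀ p ∈ ps, ∀ q, q < p.1.length → ¬ k <+: p.1.drop q ∧ ¬ p.1.drop q <+: k)
    (hco : ps = [] ∨ (2 ≤ r.length ∧ ((r[1]?.getD ' ').isDigit = true) ∧ (':' : Char) ∉ r ∧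
            (ps.all (fun p => p.1.all (fun c => !c.isDigit) && (p.1.reverse.head? != r.head?))) = true)) :
    ∀ (n : Nat) (t : List Char), t.length ≤ n →
      cuScan ps (repC k r t) = cuScan ((k, r) :: ps) t := by
  intro n
  obtain ⟨k0, hk0⟩ := List.head?_eq_some_iff.mp hk
  have hkne : k ≠ [] := by rw [hk0]; exact List.cons_ne_nil _ _
  induction n with
  | zero =>
    intro t ht
    have ht0 : t = [] := List.eq_nil_of_length_eq_zero (Nat.le_zero.mp ht)
    subst ht0
    rw [repC_nil, cuScan_nilarg, cuScan_nilarg]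
  | succ n ihn =>
    intro t ht
    cases t with
    | nil => rw [repC_nil, cuScan_nilarg, cuScan_nilarg]
    | cons c t2 =>
      by_cases hp : k.isPrefixOf (c :: t2)
      · -- the pass's own key matches at the head
        have hcpre : k <+: c :: t2 := List.isPrefixOf_iff_prefix.mp hp
        have hc : c = ':' := by
          rw [hk0] at hcpre
          exact ((List.cons_prefix_cons.mp hcpre).1).symm
        have htryR : cuTry ((k, r) :: ps) (c :: t2) = some (k, r) := by
          rw [cuTry, if_pos hp]
        have hrhs : cuScan ((k, r) :: ps) (c :: t2) =
            r ++ cuScan ((k, r) :: ps) (t2.drop (k.length - 1)) := by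
          rw [cuScan, if_pos hc, htryR]
        have hlen : (t2.drop (k.length - 1)).length ≤ n := by
          simp only [List.length_drop, List.length_cons] at *
          omega
        rw [repC_pos _ _ _ _ hp, hrhs]
        rcases hco with hps0 | ⟨_, _, hnocolon, _⟩
        · subst hps0
          rw [cuScan_nilps, ← ihn _ hlen, cuScan_nilps]
        · rw [cuScan_passthrough ps r _ hnocolon, ihn _ hlen]
      · have hknp : ¬ k <+: c :: t2 := fun hh => hp (List.isPrefixOf_iff_prefix.mpr hh)
        cases htry : cuTry ps (c :: t2) with
        | some pr =>
          -- another key of the table matches at the head; both sides copy it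
          obtain ⟨kj, rj⟩ := pr
          obtain ⟨hmem, hpre⟩ := cuTry_eq_some htry
          obtain ⟨hhead, hlen2⟩ := hps _ hmem
          obtain ⟨wj, hwj0⟩ := List.head?_eq_some_iff.mp hhead
          have hwj : kj = ':' :: wj := hwj0
          have hpre : kj <+: c :: t2 := hpre
          have ht : (c :: t2).length ≤ n + 1 := ht
          have hc : c = ':' := by
            rw [hwj] at hpre
            exact ((List.cons_prefix_cons.mp hpre).1).symm
          obtain ⟨t3, ht3⟩ := hpre
          have ht3 : kj ++ t3 = c :: t2 := ht3
          have hrep : repC k r (c :: t2) = kj ++ repC k r t3 := by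
            rw [← ht3]
            exact repC_append k r kj (hcf _ hmem) t3
          have htryL : cuTry ps (kj ++ repC k r t3) = some (kj, rj) :=
            cuTry_of_mem hpw hmem (List.prefix_append _ _)
          have hwjlen : wj.length = kj.length - 1 := by rw [hwj]; rfl
          have hlhs : cuScan ps (kj ++ repC k r t3) = rj ++ cuScan ps (repC k r t3) := by
            rw [hwj, List.cons_append, cuScan, if_pos rfl, ← List.cons_append, ← hwj, htryL]
            simp only []
            rw [← hwjlen, List.drop_left]
          have ht2 : t2 = wj ++ t3 := by
            have := ht3
            rw [hwj, List.cons_append, hc] at this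
            exact (List.cons_inj_right _).mp this.symm
          have htryR : cuTry ((k, r) :: ps) (c :: t2) = some (kj, rj) := by
            rw [cuTry, if_neg hp, htry]
          have hrhs : cuScan ((k, r) :: ps) (c :: t2) = rj ++ cuScan ((k, r) :: ps) t3 := by
            rw [cuScan, if_pos hc, htryR, ht2]
            simp only []
            rw [← hwjlen, List.drop_left]
          have hlen3 : t3.length ≤ n := by
            have h5 : kj.length + t3.length = t2.length + 1 := by
              have := congrArg List.length ht3
              simpa using this
            have h6 : 2 ≤ kj.length := hlen2
            simp only [List.length_cons] at ht
            omega
          rw [hrep, hlhs, hrhs, ihn _ hlen3]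
        | none =>
          -- no key matches at the head: both sides copy the character
          have hlen2 : t2.length ≤ n := by simpa using Nat.le_of_succ_le_succ ht
          rw [repC_neg _ _ _ _ hp]
          have htryR : cuTry ((k, r) :: ps) (c :: t2) = none := by
            rw [cuTry, if_neg hp, htry]
          by_cases hc : c = ':'
          · have htryL : cuTry ps (c :: repC k r t2) = none := by
              apply cuTry_none
              intro p hmem'
              obtain ⟨hh, hl2⟩ := hps _ hmem'
              obtain ⟨wp, hwp⟩ := List.head?_eq_some_iff.mp hh
              rcases hco with hps0 | ⟨hr2, hdig, _, hcomp⟩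
              · subst hps0; simp at hmem'
              · have hcomp' := List.all_eq_true.mp hcomp _ hmem'
                rw [Bool.and_eq_true] at hcomp'
                obtain ⟨hdf0, hlast0⟩ := hcomp'
                have hdf : ∀ c ∈ p.1, c.isDigit = false := fun c hc => by
                  have := List.all_eq_true.mp hdf0 _ hc
                  simpa using this
                have hlast : p.1.reverse.head? ≠ r.head? := by simpa using hlast0
                obtain ⟨r0, r1, r'', hre⟩ : ∃ r0 r1 r'', r = r0 :: r1 :: r'' := by
                  cases r with
                  | nil => simp at hr2
                  | cons r0 rr =>
                    cases rr with
                    | nil => simp at hr2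
                    | cons r1 r'' => exact ⟨r0, r1, r'', rfl⟩
                intro hcon
                rw [hwp, hc, List.cons_prefix_cons] at hcon
                have hwpcon : wp <+: repC k r t2 := hcon.2
                have hwpne : wp ≠ [] := by
                  intro h0
                  rw [hwp, h0] at hl2
                  simp at hl2
                have hwpnt : ¬ wp <+: t2 := by
                  intro h2
                  have := cuTry_none' htry p hmem'
                  exact this (by rw [hwp, hc]; exact List.cons_prefix_cons.mpr ⟨rfl, h2⟩)
                have hdig1 : r1.isDigit = true := by
                  rw [hre] at hdig
                  simpa using hdig
                have hlast1 : p.1.getLast? ≠ some r0 := by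
                  rw [← List.head?_reverse]
                  rw [hre] at hlast
                  simpa using hlast
                exact noNewMatch k r r0 r1 r'' hre hdig1 p.1 hdf hlast1 n t2 hlen2
                  wp 1 (by rw [hwp]; rfl) hwpne hwpnt hwpcon
            have hlhs : cuScan ps (c :: repC k r t2) = c :: cuScan ps (repC k r t2) := by
              rw [cuScan, if_pos hc, htryL]
            have hrhs : cuScan ((k, r) :: ps) (c :: t2) = c :: cuScan ((k, r) :: ps) t2 := by
              rw [cuScan, if_pos hc, htryR]
            rw [hlhs, hrhs, ihn _ hlen2]
          · have hlhs : cuScan ps (c :: repC k r t2) = c :: cuScan ps (repC k r t2) := by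
              rw [cuScan, if_neg hc]
            have hrhs : cuScan ((k, r) :: ps) (c :: t2) = c :: cuScan ((k, r) :: ps) t2 := by
              rw [cuScan, if_neg hc]
            rw [hlhs, hrhs, ihn _ hlen2]

set_option maxRecDepth 16000 in
theorem cuStep1 : ∀ t : List Char, cuScan [("::core::ffi::c_uint".toList, "u32".toList), ("::core::ffi::c_long".toList, "i64".toList), ("::core::ffi::c_ulong".toList, "u64".toList), ("::core::ffi::c_short".toList, "i16".toList), ("::core::ffi::c_ushort".toList, "u16".toList), ("::core::ffi::c_char".toList, "i8".toList), ("::core::ffi::c_uchar".toList, "u8".toList), ("::core::ffi::c_float".toList, "f32".toList), ("::core::ffi::c_double".toList, "f64".toList), ("::core::ffi::c_void".toList, "libc::c_void".toList)] (repC "::core::ffi::c_int".toList "i32".toList t) = cuScan [("::core::ffi::c_int".toList, "i32".toList), ("::core::ffi::c_uint".toList, "u32".toList), ("::core::ffi::c_long".toList, "i64".toList), ("::core::ffi::c_ulong".toList, "u64".toList), ("::core::ffi::c_short".toList, "i16".toList), ("::core::ffi::c_ushort".toList, "u16".toList), ("::core::ffi::c_char".toList, "i8".toList), ("::core::ffi::c_uchar".toList,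 "u8".toList), ("::core::ffi::c_float".toList, "f32".toList), ("::core::ffi::c_double".toList, "f64".toList), ("::core::ffi::c_void".toList, "libc::c_void".toList)] t :=
  fun t => cuStep "::core::ffi::c_int".toList "i32".toList [("::core::ffi::c_uint".toList, "u32".toList), ("::core::ffi::c_long".toList, "i64".toList), ("::core::ffi::c_ulong".toList, "u64".toList), ("::core::ffi::c_short".toList, "i16".toList), ("::core::ffi::c_ushort".toList, "u16".toList), ("::core::ffi::c_char".toList, "i8".toList), ("::core::ffi::c_uchar".toList, "u8".toList), ("::core::ffi::c_float".toList, "f32".toList), ("::core::ffi::c_double".toList, "f64".toList), ("::core::ffi::c_void".toList, "libc::c_void".toList)] (by decide) (by decide) (by decide) (by decide) (Or.inr (by decide)) _ t le_rfl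

set_option maxRecDepth 16000 in
theorem cuStep2 : ∀ t : List Char, cuScan [("::core::ffi::c_long".toList, "i64".toList), ("::core::ffi::c_ulong".toList, "u64".toList), ("::core::ffi::c_short".toList, "i16".toList), ("::core::ffi::c_ushort".toList, "u16".toList), ("::core::ffi::c_char".toList, "i8".toList), ("::core::ffi::c_uchar".toList, "u8".toList), ("::core::ffi::c_float".toList, "f32".toList), ("::core::ffi::c_double".toList, "f64".toList), ("::core::ffi::c_void".toList, "libc::c_void".toList)] (repC "::core::ffi::c_uint".toList "u32".toList t) = cuScan [("::core::ffi::c_uint".toList, "u32".toList), ("::core::ffi::c_long".toList, "i64".toList), ("::core::ffi::c_ulong".toList, "u64".toList), ("::core::ffi::c_short".toList, "i16".toList), ("::core::ffi::c_ushort".toList, "u16".toList), ("::core::ffi::c_char".toList, "i8".toList), ("::core::ffi::c_uchar".toList, "u8".toList), ("::core::ffi::c_float".toList, "f32".toList), ("::core::ffi::c_double".toList, "f64".toList), ("::core::ffi::c_void".toList, "libc::c_void".toList)] t :=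
  fun t => cuStep "::core::ffi::c_uint".toList "u32".toList [("::core::ffi::c_long".toList, "i64".toList), ("::core::ffi::c_ulong".toList, "u64".toList), ("::core::ffi::c_short".toList, "i16".toList), ("::core::ffi::c_ushort".toList, "u16".toList), ("::core::ffi::c_char".toList, "i8".toList), ("::core::ffi::c_uchar".toList, "u8".toList), ("::core::ffi::c_float".toList, "f32".toList), ("::core::ffi::c_double".toList, "f64".toList), ("::core::ffi::c_void".toList, "libc::c_void".toList)] (by decide) (by decide) (by decide) (by decide) (Or.inr (by decide)) _ t le_rfl

set_option maxRecDepth 16000 in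
theorem cuStep3 : ∀ t : List Char, cuScan [("::core::ffi::c_ulong".toList, "u64".toList), ("::core::ffi::c_short".toList, "i16".toList), ("::core::ffi::c_ushort".toList, "u16".toList), ("::core::ffi::c_char".toList, "i8".toList), ("::core::ffi::c_uchar".toList, "u8".toList), ("::core::ffi::c_float".toList, "f32".toList), ("::core::ffi::c_double".toList, "f64".toList), ("::core::ffi::c_void".toList, "libc::c_void".toList)] (repC "::core::ffi::c_long".toList "i64".toList t) = cuScan [("::core::ffi::c_long".toList, "i64".toList), ("::core::ffi::c_ulong".toList, "u64".toList), ("::core::ffi::c_short".toList, "i16".toList), ("::core::ffi::c_ushort".toList, "u16".toList), ("::core::ffi::c_char".toList, "i8".toList), ("::core::ffi::c_uchar".toList, "u8".toList), ("::core::ffi::c_float".toList, "f32".toList), ("::core::ffi::c_double".toList, "f64".toList), ("::core::ffi::c_void".toList, "libc::c_void".toList)] t :=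
  fun t => cuStep "::core::ffi::c_long".toList "i64".toList [("::core::ffi::c_ulong".toList, "u64".toList), ("::core::ffi::c_short".toList, "i16".toList), ("::core::ffi::c_ushort".toList, "u16".toList), ("::core::ffi::c_char".toList, "i8".toList), ("::core::ffi::c_uchar".toList, "u8".toList), ("::core::ffi::c_float".toList, "f32".toList), ("::core::ffi::c_double".toList, "f64".toList), ("::core::ffi::c_void".toList, "libc::c_void".toList)] (by decide) (by decide) (by decide) (by decide) (Or.inr (by decide)) _ t le_rfl

set_option maxRecDepth 16000 in
theorem cuStep4 : ∀ t : List Char, cuScan [("::core::ffi::c_short".toList, "i16".toList), ("::core::ffi::c_ushort".toList, "u16".toList), ("::core::ffi::c_char".toList, "i8".toList), ("::core::ffi::c_uchar".toList, "u8".toList), ("::core::ffi::c_float".toList, "f32".toList), ("::core::ffi::c_double".toList, "f64".toList), ("::core::ffi::c_void".toList, "libc::c_void".toList)] (repC "::core::ffi::c_ulong".toList "u64".toList t) = cuScan [("::core::ffi::c_ulong".toList, "u64".toList), ("::core::ffi::c_short".toList, "i16".toList), ("::core::ffi::c_ushort".toList, "u16".toList), ("::core::ffi::c_char".toList, "i8".toList),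 ("::core::ffi::c_uchar".toList, "u8".toList), ("::core::ffi::c_float".toList, "f32".toList), ("::core::ffi::c_double".toList, "f64".toList), ("::core::ffi::c_void".toList, "libc::c_void".toList)] t :=
  fun t => cuStep "::core::ffi::c_ulong".toList "u64".toList [("::core::ffi::c_short".toList, "i16".toList), ("::core::ffi::c_ushort".toList, "u16".toList), ("::core::ffi::c_char".toList, "i8".toList), ("::core::ffi::c_uchar".toList, "u8".toList), ("::core::ffi::c_float".toList, "f32".toList), ("::core::ffi::c_double".toList, "f64".toList), ("::core::ffi::c_void".toList, "libc::c_void".toList)] (by decide) (by decide) (by decide) (by decide) (Or.inr (by decide)) _ t le_rfl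

set_option maxRecDepth 16000 in
theorem cuStep5 : ∀ t : List Char, cuScan [("::core::ffi::c_ushort".toList, "u16".toList), ("::core::ffi::c_char".toList, "i8".toList), ("::core::ffi::c_uchar".toList, "u8".toList), ("::core::ffi::c_float".toList, "f32".toList), ("::core::ffi::c_double".toList, "f64".toList), ("::core::ffi::c_void".toList, "libc::c_void".toList)] (repC "::core::ffi::c_short".toList "i16".toList t) = cuScan [("::core::ffi::c_short".toList, "i16".toList), ("::core::ffi::c_ushort".toList, "u16".toList), ("::core::ffi::c_char".toList, "i8".toList), ("::core::ffi::c_uchar".toList, "u8".toList), ("::core::ffi::c_float".toList, "f32".toList), ("::core::ffi::c_double".toList, "f64".toList), ("::core::ffi::c_void".toList, "libc::c_void".toList)] t :=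
  fun t => cuStep "::core::ffi::c_short".toList "i16".toList [("::core::ffi::c_ushort".toList, "u16".toList), ("::core::ffi::c_char".toList, "i8".toList), ("::core::ffi::c_uchar".toList, "u8".toList), ("::core::ffi::c_float".toList, "f32".toList), ("::core::ffi::c_double".toList, "f64".toList), ("::core::ffi::c_void".toList, "libc::c_void".toList)] (by decide) (by decide) (by decide) (by decide) (Or.inr (by decide)) _ t le_rfl

set_option maxRecDepth 16000 in
theorem cuStep6 : ∀ t : List Char, cuScan [("::core::ffi::c_char".toList, "i8".toList), ("::core::ffi::c_uchar".toList, "u8".toList), ("::core::ffi::c_float".toList, "f32".toList), ("::core::ffi::c_double".toList, "f64".toList), ("::core::ffi::c_void".toList, "libc::c_void".toList)] (repC "::core::ffi::c_ushort".toList "u16".toList t) = cuScan [("::core::ffi::c_ushort".toList, "u16".toList), ("::core::ffi::c_char".toList, "i8".toList), ("::core::ffi::c_uchar".toList, "u8".toList), ("::core::ffi::c_float".toList, "f32".toList), ("::core::ffi::c_double".toList, "f64".toList), ("::core::ffi::c_void".toList, "libc::c_void".toList)] t :=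
  fun t => cuStep "::core::ffi::c_ushort".toList "u16".toList [("::core::ffi::c_char".toList, "i8".toList), ("::core::ffi::c_uchar".toList, "u8".toList), ("::core::ffi::c_float".toList, "f32".toList), ("::core::ffi::c_double".toList, "f64".toList), ("::core::ffi::c_void".toList, "libc::c_void".toList)] (by decide) (by decide) (by decide) (by decide) (Or.inr (by decide)) _ t le_rfl

set_option maxRecDepth 16000 in
theorem cuStep7 : ∀ t : List Char, cuScan [("::core::ffi::c_uchar".toList, "u8".toList), ("::core::ffi::c_float".toList, "f32".toList), ("::core::ffi::c_double".toList, "f64".toList), ("::core::ffi::c_void".toList, "libc::c_void".toList)] (repC "::core::ffi::c_char".toList "i8".toList t) = cuScan [("::core::ffi::c_char".toList, "i8".toList), ("::core::ffi::c_uchar".toList, "u8".toList), ("::core::ffi::c_float".toList, "f32".toList), ("::core::ffi::c_double".toList, "f64".toList), ("::core::ffi::c_void".toList, "libc::c_void".toList)] t :=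
  fun t => cuStep "::core::ffi::c_char".toList "i8".toList [("::core::ffi::c_uchar".toList, "u8".toList), ("::core::ffi::c_float".toList, "f32".toList), ("::core::ffi::c_double".toList, "f64".toList), ("::core::ffi::c_void".toList, "libc::c_void".toList)] (by decide) (by decide) (by decide) (by decide) (Or.inr (by decide)) _ t le_rfl

set_option maxRecDepth 16000 in
theorem cuStep8 : ∀ t : List Char, cuScan [("::core::ffi::c_float".toList, "f32".toList), ("::core::ffi::c_double".toList, "f64".toList), ("::core::ffi::c_void".toList, "libc::c_void".toList)] (repC "::core::ffi::c_uchar".toList "u8".toList t) = cuScan [("::core::ffi::c_uchar".toList, "u8".toList), ("::core::ffi::c_float".toList, "f32".toList), ("::core::ffi::c_double".toList, "f64".toList), ("::core::ffi::c_void".toList, "libc::c_void".toList)] t :=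
  fun t => cuStep "::core::ffi::c_uchar".toList "u8".toList [("::core::ffi::c_float".toList, "f32".toList), ("::core::ffi::c_double".toList, "f64".toList), ("::core::ffi::c_void".toList, "libc::c_void".toList)] (by decide) (by decide) (by decide) (by decide) (Or.inr (by decide)) _ t le_rfl

set_option maxRecDepth 16000 in
theorem cuStep9 : ∀ t : List Char, cuScan [("::core::ffi::c_double".toList, "f64".toList), ("::core::ffi::c_void".toList, "libc::c_void".toList)] (repC "::core::ffi::c_float".toList "f32".toList t) = cuScan [("::core::ffi::c_float".toList, "f32".toList), ("::core::ffi::c_double".toList, "f64".toList), ("::core::ffi::c_void".toList, "libc::c_void".toList)] t :=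
  fun t => cuStep "::core::ffi::c_float".toList "f32".toList [("::core::ffi::c_double".toList, "f64".toList), ("::core::ffi::c_void".toList, "libc::c_void".toList)] (by decide) (by decide) (by decide) (by decide) (Or.inr (by decide)) _ t le_rfl

set_option maxRecDepth 16000 in
theorem cuStep10 : ∀ t : List Char, cuScan [("::core::ffi::c_void".toList, "libc::c_void".toList)] (repC "::core::ffi::c_double".toList "f64".toList t) = cuScan [("::core::ffi::c_double".toList, "f64".toList), ("::core::ffi::c_void".toList, "libc::c_void".toList)] t :=
  fun t => cuStep "::core::ffi::c_double".toList "f64".toList [("::core::ffi::c_void".toList, "libc::c_void".toList)] (by decide) (by decide) (by decide) (by decide) (Or.inr (by decide)) _ t le_rfl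

set_option maxRecDepth 16000 in
theorem cuStep11 : ∀ t : List Char, cuScan [] (repC "::core::ffi::c_void".toList "libc::c_void".toList t) = cuScan [("::core::ffi::c_void".toList, "libc::c_void".toList)] t :=
  fun t => cuStep "::core::ffi::c_void".toList "libc::c_void".toList [] (by decide) (by decide) (by decide) (by decide) (Or.inl rfl) _ t le_rfl

theorem chars_main (cs : List Char) :
    repC "::core::ffi::c_void".toList "libc::c_void".toList
      (repC "::core::ffi::c_double".toList "f64".toList
        (repC "::core::ffi::c_float".toList "f32".toList
          (repC "::core::ffi::c_uchar".toList "u8".toList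
            (repC "::core::ffi::c_char".toList "i8".toList
              (repC "::core::ffi::c_ushort".toList "u16".toList
                (repC "::core::ffi::c_short".toList "i16".toList
                  (repC "::core::ffi::c_ulong".toList "u64".toList
                    (repC "::core::ffi::c_long".toList "i64".toList
                      (repC "::core::ffi::c_uint".toList "u32".toList
                        (repC "::core::ffi::c_int".toList "i32".toList cs)))))))))) =
    cuScan cuKeys cs := by
  unfold cuKeys
  rw [← cuStep1]
  rw [← cuStep2]
  rw [← cuStep3]
  rw [← cuStep4]
  rw [← cuStep5]
  rw [← cuStep6]
  rw [← cuStep7]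
  rw [← cuStep8]
  rw [← cuStep9]
  rw [← cuStep10]
  rw [← cuStep11]
  rw [cuScan_nilps]

-- ===== VERDICT (by name: the statement is the Claim_ definition above) =====
theorem cleanup_type_aliases_spec : Claim_equal_cleanup_type_aliases := by
  intro content _
  unfold Spec_cleanup_type_aliases
  have h1 : (cleanup_type_aliases content).toList = cuScan cuKeys content.toList := by
    simp only [cleanup_type_aliases, List.foldl_cons, List.foldl_nil, PySem.Str.replace,
      String.toList_ofList]
    rw [replace_eq_repC _ _ _ (by decide), replace_eq_repC _ _ _ (by decide),
        replace_eq_repC _ _ _ (by decide), replace_eq_repC _ _ _ (by decide),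
        replace_eq_repC _ _ _ (by decide), replace_eq_repC _ _ _ (by decide),
        replace_eq_repC _ _ _ (by decide), replace_eq_repC _ _ _ (by decide),
        replace_eq_repC _ _ _ (by decide), replace_eq_repC _ _ _ (by decide),
        replace_eq_repC _ _ _ (by decide)]
    exact chars_main content.toList
  calc cleanup_type_aliases content
      = String.ofList ((cleanup_type_aliases content).toList) := String.ofList_toList.symm
    _ = String.ofList (cuScan cuKeys content.toList) := by rw [h1]
    _ = cleanup_type_aliases_alt content := rfl
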